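-- pv_equiv track=rewrite | github.com/p-lots/codewars | 7-kyu/math-engine/python/solution.py | math_engine
-- ===== SOURCE A (Python) =====
-- from functools import reduce
-- from operator import mul
--
-- def math_engine(arr):
--     if arr == None:
--         return 0
--     elif len(arr) == 0:
--         return 1
--     negatives = [n for n in arr if n < 0]
--     positives = [n for n in arr if n >= 0]
--     if len(negatives) == 0 and len(positives) > 0:
--         return reduce(mul, positives, 1)
--     elif len(positives) == 0 and len(negatives) > 0:
--         return sum(negatives) + 1
--     elif len(negatives) == 0 and len(positives) == 0:
--         return 0
--     return reduce(mul, positives, 1) + sum(negatives)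
-- ===== SOURCE B (Python) =====
-- def math_engine(arr):
--     if arr == None:
--         return 0
--     prod, neg_sum = 1, 0
--     for n in arr:
--         if n < 0:
--             neg_sum += n
--         else:
--             prod *= n
--     return prod + neg_sum
-- ===== Notes on version B (the rewrite author's own statement) =====
-- stated objective: simpler
-- what changed: Replaces the two filtered lists and the four length-based branches with a single pass keeping a product and a negative-sum accumulator; prod+neg_sum equals every branch of A (including the only-negatives sum+1 case, since prod=1 there).
import Mathlib
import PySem

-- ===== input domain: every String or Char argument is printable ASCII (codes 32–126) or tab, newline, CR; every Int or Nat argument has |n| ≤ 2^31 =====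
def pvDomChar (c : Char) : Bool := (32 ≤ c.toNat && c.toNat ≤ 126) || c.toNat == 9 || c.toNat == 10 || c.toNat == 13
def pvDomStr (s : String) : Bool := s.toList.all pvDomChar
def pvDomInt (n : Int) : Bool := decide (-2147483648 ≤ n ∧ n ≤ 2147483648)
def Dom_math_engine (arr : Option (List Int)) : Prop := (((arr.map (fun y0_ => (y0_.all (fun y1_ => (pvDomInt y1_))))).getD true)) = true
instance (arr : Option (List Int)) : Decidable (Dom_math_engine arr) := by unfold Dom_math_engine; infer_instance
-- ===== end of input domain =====

-- B collapses A's filtered lists and length-based branches into one pass with two accumulators (simpler; same cost).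

-- ===== PORT A =====
def math_engine (arr : Option (List Int)) : Int :=
  match arr with
  | none => 0
  | some arr =>
    if arr.length = 0 then 1
    else
      let negatives := arr.filter (fun n => decide (n < 0))
      let positives := arr.filter (fun n => decide (0 ≤ n))
      if negatives.length = 0 ∧ positives.length > 0 then positives.foldl (· * ·) 1
      else if positives.length = 0 ∧ negatives.length > 0 then negatives.sum + 1
      else if negatives.length = 0 ∧ positives.length = 0 then 0
      else positives.foldl (· * ·) 1 + negatives.sum

-- ===== PORT B =====
def math_engine_alt (arr : Option (List Int)) : Int :=
  match arr with
  | none => 0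
  | some xs =>
    let acc := xs.foldl
      (fun (a : Int × Int) n => if n < 0 then (a.1, a.2 + n) else (a.1 * n, a.2)) (1, 0)
    acc.1 + acc.2

-- ===== PRECONDITION & SPEC =====
def Spec_math_engine (arr : Option (List Int)) (out : Int) : Prop := out = math_engine_alt arr
instance (arr : Option (List Int)) (out : Int) : Decidable (Spec_math_engine arr out) := by unfold Spec_math_engine; infer_instance

-- ===== CLAIM (what is proved, stated in full; the proofs are below) =====
def Claim_equal_math_engine : Prop := ∀ (arr : Option (List Int)), Dom_math_engine arr → Spec_math_engine arr (math_engine arr)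

-- ===== LEMMAS AND PROOFS =====

-- B's paired fold computes (p · product of nonnegatives, s + sum of negatives).
theorem pv_fold_ps (xs : List Int) (p s : Int) :
    xs.foldl (fun (a : Int × Int) n => if n < 0 then (a.1, a.2 + n) else (a.1 * n, a.2)) (p, s)
      = (p * (xs.filter (fun n => decide (0 ≤ n))).prod,
         s + (xs.filter (fun n => decide (n < 0))).sum) := by
  induction xs generalizing p s with
  | nil => simp
  | cons x t ih =>
    by_cases hx : x < 0 <;>
      simp [List.foldl_cons, hx, ih, not_lt.mp, mul_assoc] <;> ring_nf

theorem pv_filter_split (xs : List Int) :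
    (xs.filter (fun n => decide (n < 0))).length + (xs.filter (fun n => decide (0 ≤ n))).length
      = xs.length := by
  induction xs with
  | nil => simp
  | cons x t ih =>
    by_cases hx : x < 0 <;> simp [hx, not_lt.mp] <;> omega

-- ===== VERDICT (by name: the statement is the Claim_ definition above) =====
theorem math_engine_spec : Claim_equal_math_engine := by
  intro arr _
  unfold Spec_math_engine math_engine math_engine_alt
  cases arr with
  | none => rfl
  | some xs =>
    simp only [pv_fold_ps, one_mul, zero_add]
    have hsplit := pv_filter_split xs
    by_cases hlen : xs.length = 0
    · rw [if_pos hlen]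
      have : xs = [] := List.length_eq_zero_iff.mp hlen
      subst this; simp
    · rw [if_neg hlen]
      have hprod : (xs.filter (fun n => decide (0 ≤ n))).foldl (· * ·) 1
          = (xs.filter (fun n => decide (0 ≤ n))).prod := List.prod_eq_foldl.symm
      by_cases hn : (xs.filter (fun n => decide (n < 0))).length = 0
      · have hne : (xs.filter (fun n => decide (n < 0))) = [] := List.length_eq_zero_iff.mp hn
        have hpos : (xs.filter (fun n => decide (0 ≤ n))).length > 0 := by omega
        rw [if_pos ⟨hn, hpos⟩, hprod, hne]
        simp
      · by_cases hp : (xs.filter (fun n => decide (0 ≤ n))).length = 0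
        · have hpe : (xs.filter (fun n => decide (0 ≤ n))) = [] := List.length_eq_zero_iff.mp hp
          rw [if_neg (by omega : ¬((xs.filter (fun n => decide (n < 0))).length = 0 ∧ (xs.filter (fun n => decide (0 ≤ n))).length > 0)),
              if_pos ⟨hp, by omega⟩, hpe]
          simp; ring
        · rw [if_neg (by omega : ¬((xs.filter (fun n => decide (n < 0))).length = 0 ∧ (xs.filter (fun n => decide (0 ≤ n))).length > 0)),
              if_neg (by omega : ¬((xs.filter (fun n => decide (0 ≤ n))).length = 0 ∧ (xs.filter (fun n => decide (n < 0))).length > 0)),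
              if_neg (by omega : ¬((xs.filter (fun n => decide (n < 0))).length = 0 ∧ (xs.filter (fun n => decide (0 ≤ n))).length = 0)),
              hprod]
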